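-- pv_equiv track=rewrite | github.com/bqth29/simulated-bifurcation-algorithm | .github/scripts/metadata_checker/metadata_checker.py | parse_citation_file
-- ===== SOURCE A (Python) =====
-- from collections import defaultdict
-- from typing import Callable, Dict, Iterator, List, Set, Tuple, Union
--
-- def parse_citation_file(content: List[str]) -> Dict[str, List[Tuple[str, int]]]:
--     definitions = [("version:", "version"), ("date-released:", "date")]
--     variables = defaultdict(list)
--     for field, var_name in definitions:
--         for line_nb, line in enumerate(content):
--             if line.startswith(field):
--                 value = line[len(field) :].strip()
--                 variables[var_name].append((value, line_nb))
--     return variables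
-- ===== SOURCE B (Python) =====
-- from collections import defaultdict
-- from typing import Dict, List, Tuple
--
--
-- def parse_citation_file(content: List[str]) -> Dict[str, List[Tuple[str, int]]]:
--     versions = []
--     dates = []
--     for line_nb, line in enumerate(content):
--         if line.startswith("version:"):
--             versions.append((line[len("version:"):].strip(), line_nb))
--         elif line.startswith("date-released:"):
--             dates.append((line[len("date-released:"):].strip(), line_nb))
--     variables = defaultdict(list)
--     if versions:
--         variables["version"] = versions
--     if dates:
--         variables["date"] = dates
--     return variables
-- ===== Notes on version B (the rewrite author's own statement) =====
-- stated objective: alternative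
-- what changed: B replaces A's field-major repeated scans of content (one full pass per definition, appending into a defaultdict per match) by a single line-major pass keeping two plain list accumulators, assembling the result dict once at the end.
import Mathlib
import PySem

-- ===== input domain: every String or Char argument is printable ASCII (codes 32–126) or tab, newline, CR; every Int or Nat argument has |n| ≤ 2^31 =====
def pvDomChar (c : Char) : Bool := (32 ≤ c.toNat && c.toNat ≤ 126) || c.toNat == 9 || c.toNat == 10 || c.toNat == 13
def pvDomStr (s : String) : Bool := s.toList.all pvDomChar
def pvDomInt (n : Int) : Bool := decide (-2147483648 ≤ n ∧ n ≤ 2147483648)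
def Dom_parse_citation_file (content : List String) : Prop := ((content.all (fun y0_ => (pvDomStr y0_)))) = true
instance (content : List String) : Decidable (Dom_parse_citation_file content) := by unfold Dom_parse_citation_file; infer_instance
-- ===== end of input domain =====

-- B changes the decomposition: one line-major pass with two list accumulators instead of
-- A's field-major repeated scans with per-match defaultdict operations (same results).

-- ===== PORT A =====
-- A: for each (field, var_name) in definitions, scan all of content; on a prefix match,
-- append (stripped remainder, line number) to variables[var_name] (defaultdict(list)).
def parse_citation_file (content : List String) : List (String × List (String × Int)) :=
  let definitions : List (String × String) := [("version:", "version"), ("date-released:", "date")]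
  let vars0 : PySem.Dict String (List (String × Int)) :=
    definitions.foldl
      (fun vars fv =>
        (PySem.List.enumerate content 0).foldl
          (fun vars p =>
            if PySem.Str.startswith p.2 fv.1 then
              vars.modify fv.2 []
                (· ++ [(PySem.Str.strip (PySem.Str.slice p.2 (some (PySem.Str.len fv.1)) none), p.1)])
            else vars)
          vars)
      PySem.Dict.empty
  vars0.items

-- ===== PORT B =====
-- B: one pass over enumerate(content) with two list accumulators, dict built at the end.
def parse_citation_file_alt (content : List String) : List (String × List (String × Int)) :=
  let acc : List (String × Int) × List (String × Int) :=
    (PySem.List.enumerate content 0).foldl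
      (fun acc p =>
        if PySem.Str.startswith p.2 "version:" then
          (acc.1 ++ [(PySem.Str.strip (PySem.Str.slice p.2 (some (PySem.Str.len "version:")) none), p.1)], acc.2)
        else if PySem.Str.startswith p.2 "date-released:" then
          (acc.1, acc.2 ++ [(PySem.Str.strip (PySem.Str.slice p.2 (some (PySem.Str.len "date-released:")) none), p.1)])
        else acc)
      ([], [])
  (if acc.1 ≠ [] then [("version", acc.1)] else []) ++ (if acc.2 ≠ [] then [("date", acc.2)] else [])

-- ===== PRECONDITION & SPEC =====
def Spec_parse_citation_file (content : List String) (out : List (String × List (String × Int))) : Prop := out = parse_citation_file_alt content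
instance (content : List String) (out : List (String × List (String × Int))) : Decidable (Spec_parse_citation_file content out) := by unfold Spec_parse_citation_file; infer_instance

-- ===== CLAIM (what is proved, stated in full; the proofs are below) =====
def Claim_equal_parse_citation_file : Prop := ∀ (content : List String), Dom_parse_citation_file content → Spec_parse_citation_file content (parse_citation_file content)

-- ===== LEMMAS AND PROOFS =====

-- matches of one field over an enumerated line list
def pvMatches (f : String) (l : List (Int × String)) : List (String × Int) :=
  l.filterMap (fun p =>
    if PySem.Str.startswith p.2 f then
      some (PySem.Str.strip (PySem.Str.slice p.2 (some (PySem.Str.len f)) none), p.1)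
    else none)

-- A's inner loop over one field, as a function of the accumulated dict
def pvStepA (f name : String) (vars : PySem.Dict String (List (String × Int)))
    (p : Int × String) : PySem.Dict String (List (String × Int)) :=
  if PySem.Str.startswith p.2 f then
    vars.modify name [] (· ++ [(PySem.Str.strip (PySem.Str.slice p.2 (some (PySem.Str.len f)) none), p.1)])
  else vars

-- the two prefixes are never both prefixes of the same line
theorem pv_not_both (s : List Char)
    (h : PySem.Chars.startswith s "version:".toList = true) :
    PySem.Chars.startswith s "date-released:".toList = false := by
  rcases (PySem.Chars.startswith_iff s "version:".toList).mp h with ⟨t, ht⟩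
  by_contra hc
  rw [Bool.not_eq_false] at hc
  rcases (PySem.Chars.startswith_iff s "date-released:".toList).mp hc with ⟨u, hu⟩
  rw [← ht] at hu
  have hdv : ('d' : Char) = 'v' := by
    rw [show ('d' : Char) = ("date-released:".toList ++ u).headD ' ' from rfl, hu]; rfl
  exact absurd hdv (by decide)

theorem pvInnerA (f name : String) (l : List (Int × String))
    (d : PySem.Dict String (List (String × Int))) :
    l.foldl (pvStepA f name) d =
      if pvMatches f l = [] then d else d.modify name [] (· ++ pvMatches f l) := by
  induction l generalizing d with
  | nil => simp [pvMatches]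
  | cons p l ih =>
    by_cases h : PySem.Chars.startswith p.2.toList f.toList = true
    · have hm : pvMatches f (p :: l) =
        (PySem.Str.strip (PySem.Str.slice p.2 (some (PySem.Str.len f)) none), p.1) :: pvMatches f l := by
        simp [pvMatches, PySem.Str.startswith, h]
      rw [hm]
      simp only [List.foldl_cons]
      have hstep : pvStepA f name d p =
          d.modify name [] (· ++ [(PySem.Str.strip (PySem.Str.slice p.2 (some (PySem.Str.len f)) none), p.1)]) := by
        simp [pvStepA, PySem.Str.startswith, h]
      rw [hstep, ih]
      by_cases hml : pvMatches f l = []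
      · simp [hml]
      · simp only [hml, if_neg (by simp : ¬((_ :: pvMatches f l : List (String × Int)) = []))]
        simp [PySem.Dict.modify, PySem.Dict.insert_insert_self, PySem.Dict.getD_insert_self]
    · have hm : pvMatches f (p :: l) = pvMatches f l := by
        simp [pvMatches, PySem.Str.startswith, h]
      have hstep : pvStepA f name d p = d := by simp [pvStepA, PySem.Str.startswith, h]
      rw [hm]; simp only [List.foldl_cons, hstep, ih]

-- B's loop computes exactly the two match lists
theorem pvLoopB (l : List (Int × String)) (a b : List (String × Int)) :
    l.foldl
      (fun acc p =>
        if PySem.Str.startswith p.2 "version:" then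
          (acc.1 ++ [(PySem.Str.strip (PySem.Str.slice p.2 (some (PySem.Str.len "version:")) none), p.1)], acc.2)
        else if PySem.Str.startswith p.2 "date-released:" then
          (acc.1, acc.2 ++ [(PySem.Str.strip (PySem.Str.slice p.2 (some (PySem.Str.len "date-released:")) none), p.1)])
        else acc)
      (a, b)
    = (a ++ pvMatches "version:" l, b ++ pvMatches "date-released:" l) := by
  induction l generalizing a b with
  | nil => simp [pvMatches]
  | cons p l ih =>
    rw [List.foldl_cons]
    by_cases h1 : PySem.Chars.startswith p.2.toList "version:".toList = true
    · have h2 := pv_not_both p.2.toList h1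
      have hm1 : pvMatches "version:" (p :: l) =
          (PySem.Str.strip (PySem.Str.slice p.2 (some (PySem.Str.len "version:")) none), p.1)
            :: pvMatches "version:" l := by
        simp only [pvMatches, List.filterMap_cons, PySem.Str.startswith, h1]; simp
      have hm2 : pvMatches "date-released:" (p :: l) = pvMatches "date-released:" l := by
        simp only [pvMatches, List.filterMap_cons, PySem.Str.startswith, h2]; simp
      rw [show (if PySem.Str.startswith p.2 "version:" then
            ((a, b).1 ++ [(PySem.Str.strip (PySem.Str.slice p.2 (some (PySem.Str.len "version:")) none), p.1)], (a, b).2)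
          else if PySem.Str.startswith p.2 "date-released:" then
            ((a, b).1, (a, b).2 ++ [(PySem.Str.strip (PySem.Str.slice p.2 (some (PySem.Str.len "date-released:")) none), p.1)])
          else (a, b))
        = (a ++ [(PySem.Str.strip (PySem.Str.slice p.2 (some (PySem.Str.len "version:")) none), p.1)], b)
        from by simp only [PySem.Str.startswith]; rw [h1]; simp, ih, hm1, hm2]
      simp
    · rw [Bool.not_eq_true] at h1
      have hm1 : pvMatches "version:" (p :: l) = pvMatches "version:" l := by
        simp only [pvMatches, List.filterMap_cons, PySem.Str.startswith, h1]; simp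
      by_cases h2 : PySem.Chars.startswith p.2.toList "date-released:".toList = true
      · have hm2 : pvMatches "date-released:" (p :: l) =
            (PySem.Str.strip (PySem.Str.slice p.2 (some (PySem.Str.len "date-released:")) none), p.1)
              :: pvMatches "date-released:" l := by
          simp only [pvMatches, List.filterMap_cons, PySem.Str.startswith, h2]; simp
        rw [show (if PySem.Str.startswith p.2 "version:" then
              ((a, b).1 ++ [(PySem.Str.strip (PySem.Str.slice p.2 (some (PySem.Str.len "version:")) none), p.1)], (a, b).2)
            else if PySem.Str.startswith p.2 "date-released:" then
              ((a, b).1, (a, b).2 ++ [(PySem.Str.strip (PySem.Str.slice p.2 (some (PySem.Str.len "date-released:")) none), p.1)])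
            else (a, b))
          = (a, b ++ [(PySem.Str.strip (PySem.Str.slice p.2 (some (PySem.Str.len "date-released:")) none), p.1)])
          from by simp only [PySem.Str.startswith]; rw [h1, h2]; simp, ih, hm1, hm2]
        simp
      · rw [Bool.not_eq_true] at h2
        have hm2 : pvMatches "date-released:" (p :: l) = pvMatches "date-released:" l := by
          simp only [pvMatches, List.filterMap_cons, PySem.Str.startswith, h2]; simp
        rw [show (if PySem.Str.startswith p.2 "version:" then
              ((a, b).1 ++ [(PySem.Str.strip (PySem.Str.slice p.2 (some (PySem.Str.len "version:")) none), p.1)], (a, b).2)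
            else if PySem.Str.startswith p.2 "date-released:" then
              ((a, b).1, (a, b).2 ++ [(PySem.Str.strip (PySem.Str.slice p.2 (some (PySem.Str.len "date-released:")) none), p.1)])
            else (a, b))
          = (a, b) from by simp only [PySem.Str.startswith]; rw [h1, h2]; simp, ih, hm1, hm2]

-- ===== VERDICT (by name: the statement is the Claim_ definition above) =====
theorem parse_citation_file_spec : Claim_equal_parse_citation_file := by
  intro content _
  unfold Spec_parse_citation_file parse_citation_file parse_citation_file_alt
  rw [pvLoopB]
  simp only [List.foldl_cons, List.foldl_nil, List.nil_append]
  set l := PySem.List.enumerate content 0 with hl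
  set m1 := pvMatches "version:" l with hm1
  set m2 := pvMatches "date-released:" l with hm2
  show (l.foldl (pvStepA "date-released:" "date")
      (l.foldl (pvStepA "version:" "version") PySem.Dict.empty)).items = _
  rw [pvInnerA "version:" "version" l PySem.Dict.empty, ← hm1,
      pvInnerA "date-released:" "date" l _, ← hm2]
  by_cases hv : m1 = [] <;> by_cases hd : m2 = [] <;>
    simp [hv, hd, PySem.Dict.modify, PySem.Dict.insert, PySem.Dict.getD, PySem.Dict.get?,
      PySem.Dict.empty, PySem.Dict.contains]
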